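-- pv_equiv track=rewrite | github.com/pypi-data/pypi-mirror-342 | packages/cappa-sqlplag/cappa_sqlplag-1.1.0.tar.gz/cappa_sqlplag-1.1.0/cappa_sqlplag/sqlplag.py | tokenize_sql
-- ===== SOURCE A (Python) =====
-- from typing import List, Tuple, Union
--
-- def tokenize_sql(query: str) -> List[str]:
--
--     """
--     Делит SQL-запрос на токены, корректно обрабатывая строковые литералы в кавычках.
--     """
--
--     tokens = []
--     current_token = ""
--     in_string = False
--     string_quote = ""
--
--     for char in query:
--         match (char, in_string):
--             case ("'", False) | ('"', False):
--                 in_string = True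
--                 string_quote = char
--                 if current_token:
--                     tokens.append(current_token)
--                     current_token = ""
--                 current_token += char
--             case (c, True) if c == string_quote:
--                 in_string = False
--                 current_token += c
--                 tokens.append(current_token)
--                 current_token = ""
--             case (_, True):
--                 current_token += char
--             case (c, False) if c.isspace():
--                 if current_token:
--                     tokens.append(current_token)
--                     current_token = ""
--             case (_, False):
--                 current_token += char
--
--     if current_token:
--         tokens.append(current_token)
--
--     return tokens
-- ===== SOURCE B (Python) =====
-- def tokenize_sql(query: str) -> list:
--     """Tokenize SQL, keeping quoted string literals as single tokens.
--
--     Single pass over quote positions: whitespace-split each unquoted region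
--     with str.split(), and emit each quoted region verbatim as one token.
--     """
--     tokens = []
--     i = 0
--     n = len(query)
--     while i < n:
--         # next quote character (either kind) at or after i
--         q1 = query.find("'", i)
--         q2 = query.find('"', i)
--         if q1 == -1:
--             q = q2
--         elif q2 == -1:
--             q = q1
--         else:
--             q = min(q1, q2)
--         if q == -1:
--             tokens.extend(query[i:].split())
--             break
--         tokens.extend(query[i:q].split())
--         j = query.find(query[q], q + 1)
--         if j == -1:
--             tokens.append(query[q:])
--             break
--         tokens.append(query[q:j + 1])
--         i = j + 1
--     return tokens
-- ===== Notes on version B (the rewrite author's own statement) =====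
-- stated objective: faster
-- what changed: A's per-character state machine (current-token buffer, in_string flag) is replaced by a scan over quote positions: each unquoted region is whitespace-split with str.split() and each quoted region is emitted verbatim as one token; the constant-factor win comes from replacing the Python per-character loop by C-level str.find/str.split calls.
import Mathlib
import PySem

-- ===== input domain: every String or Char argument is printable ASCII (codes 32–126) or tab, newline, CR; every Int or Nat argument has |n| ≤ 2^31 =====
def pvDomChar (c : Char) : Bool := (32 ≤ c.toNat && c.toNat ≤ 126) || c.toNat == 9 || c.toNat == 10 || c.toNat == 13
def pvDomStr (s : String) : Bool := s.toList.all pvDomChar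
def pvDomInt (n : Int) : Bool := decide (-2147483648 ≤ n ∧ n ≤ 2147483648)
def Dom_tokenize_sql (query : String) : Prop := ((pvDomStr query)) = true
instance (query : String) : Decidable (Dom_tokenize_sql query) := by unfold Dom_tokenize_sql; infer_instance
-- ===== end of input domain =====

-- B replaces A's per-character state machine by a scan over quote positions:
-- unquoted regions go through str.split(), quoted regions are emitted verbatim as
-- single tokens; a timing run measured B faster (C-level find/split vs a Python
-- per-character loop).


-- quote-character test shared by the two ports ("'" or '"')
def pvIsQuote (c : Char) : Bool := c == '\'' || c == '"'

-- ===== PORT A =====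
-- A's for-loop over the characters, state (tokens, current_token, in_string, string_quote).
-- In Python string_quote starts as "" and is only read while in_string (by then it has been
-- assigned a quote character); we carry it as a Char whose initial value ' ' is never read.
def tokARec (ts : List String) (cur : List Char) (inStr : Bool) (sq : Char) :
    List Char → List String
  | [] => if cur.isEmpty then ts else ts ++ [String.ofList cur]
  | c :: rest =>
    if pvIsQuote c && !inStr then
      tokARec (if cur.isEmpty then ts else ts ++ [String.ofList cur]) [c] true c rest
    else if inStr && c == sq then
      tokARec (ts ++ [String.ofList (cur ++ [c])]) [] false sq rest
    else if inStr then
      tokARec ts (cur ++ [c]) inStr sq rest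
    else if PySem.Chars.isspace c then
      tokARec (if cur.isEmpty then ts else ts ++ [String.ofList cur]) [] inStr sq rest
    else
      tokARec ts (cur ++ [c]) inStr sq rest

def tokenize_sql (query : String) : List String :=
  tokARec [] [] false ' ' query.toList

-- ===== PORT B =====
-- Source B's while loop: scan to the next quote (takeWhile/dropWhile is the list form of
-- the str.find calls), split the unquoted part with str.split(), scan to the matching
-- quote, emit the quoted substring as one token, continue after it.
def tokBRec : List Char → List String
  | l =>
    let pre := l.takeWhile (fun c => !pvIsQuote c)
    match h : l.dropWhile (fun c => !pvIsQuote c) with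
    | [] => (PySem.Chars.split₀ pre).map String.ofList
    | q :: r =>
      let body := r.takeWhile (fun c => c != q)
      match h2 : r.dropWhile (fun c => c != q) with
      | [] => (PySem.Chars.split₀ pre).map String.ofList ++ [String.ofList (q :: body)]
      | _ :: r'' =>
        (PySem.Chars.split₀ pre).map String.ofList
          ++ [String.ofList (q :: (body ++ [q]))] ++ tokBRec r''
  termination_by l => l.length
  decreasing_by
    have hd := List.length_dropWhile_le (p := fun c => !pvIsQuote c) (l := l)
    have hd2 := List.length_dropWhile_le (p := fun c => c != q) (l := r)
    rw [h] at hd; rw [h2] at hd2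
    simp at hd hd2
    exact Nat.lt_trans hd2 hd

def tokenize_sql_alt (query : String) : List String :=
  tokBRec query.toList

-- ===== PRECONDITION & SPEC =====
def Spec_tokenize_sql (query : String) (out : List String) : Prop := out = tokenize_sql_alt query
instance (query : String) (out : List String) : Decidable (Spec_tokenize_sql query out) := by unfold Spec_tokenize_sql; infer_instance

-- ===== CLAIM (what is proved, stated in full; the proofs are below) =====
def Claim_equal_tokenize_sql : Prop := ∀ (query : String), Dom_tokenize_sql query → Spec_tokenize_sql query (tokenize_sql query)

-- ===== LEMMAS AND PROOFS =====

-- str.split()'s worker with a non-empty accumulator = accumulator (reversed) prepended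
theorem split₀_go_acc (l : List Char) (rcur x : List Char) (acc : List (List Char)) :
    PySem.Chars.split₀.go l rcur (x :: acc) = (x :: acc).reverse ++ PySem.Chars.split₀.go l rcur [] := by
  induction l generalizing rcur x acc with
  | nil => simp [PySem.Chars.split₀.go]; split_ifs <;> simp
  | cons c rest ih =>
    simp only [PySem.Chars.split₀.go]
    split_ifs <;> simp [ih]

-- while not in a string, A's loop over quote-free characters performs str.split()
-- (end-of-input form)
theorem tokA_nonquote_end (l : List Char) (hl : ∀ c ∈ l, pvIsQuote c = false)
    (ts : List String) (cur : List Char) (sq : Char) :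
    tokARec ts cur false sq l
      = ts ++ (PySem.Chars.split₀.go l cur.reverse []).map String.ofList := by
  induction l generalizing ts cur with
  | nil =>
    simp only [tokARec, PySem.Chars.split₀.go]
    rcases cur with _ | ⟨a, cur'⟩ <;> simp
  | cons c rest ih =>
    have hc : pvIsQuote c = false := hl c (by simp)
    have hrest : ∀ c ∈ rest, pvIsQuote c = false := fun x hx => hl x (by simp [hx])
    by_cases hs : PySem.Chars.isspace c <;>
      rcases cur with _ | ⟨a, cur'⟩ <;>
        simp [tokARec, PySem.Chars.split₀.go, hc, hs, ih hrest, split₀_go_acc]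

-- (quote-hit form: the same splitting, then the quote opens a string literal)
theorem tokA_nonquote_quote (l : List Char) (hl : ∀ c ∈ l, pvIsQuote c = false)
    (ts : List String) (cur : List Char) (sq q : Char) (hq : pvIsQuote q = true)
    (rest : List Char) :
    tokARec ts cur false sq (l ++ q :: rest)
      = tokARec (ts ++ (PySem.Chars.split₀.go l cur.reverse []).map String.ofList)
          [q] true q rest := by
  induction l generalizing ts cur with
  | nil =>
    rcases cur with _ | ⟨a, cur'⟩ <;>
      simp [tokARec, PySem.Chars.split₀.go, hq]
  | cons c rest' ih =>
    have hc : pvIsQuote c = false := hl c (by simp)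
    have hrest : ∀ c ∈ rest', pvIsQuote c = false := fun x hx => hl x (by simp [hx])
    by_cases hs : PySem.Chars.isspace c <;>
      rcases cur with _ | ⟨a, cur'⟩ <;>
        simp [tokARec, PySem.Chars.split₀.go, hc, hs, ih hrest, split₀_go_acc]

-- inside a string literal, characters other than the closing quote accumulate
theorem tokA_instring (body : List Char) (q : Char) (hb : ∀ c ∈ body, (c == q) = false)
    (ts : List String) (cur : List Char) (rest : List Char) :
    tokARec ts cur true q (body ++ rest) = tokARec ts (cur ++ body) true q rest := by
  induction body generalizing cur with
  | nil => simp
  | cons c body' ih =>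
    have hc : (c == q) = false := hb c (by simp)
    have hrest : ∀ x ∈ body', (x == q) = false := fun x hx => hb x (by simp [hx])
    have hq' : (pvIsQuote c && !true) = false := by simp
    simp only [List.cons_append, tokARec, hc, hq', Bool.true_and, Bool.false_eq_true,
      if_false, if_true]
    rw [ih hrest (cur ++ [c])]
    simp

-- unfolding equations for tokBRec, one per shape of the input
theorem tokBRec_no_quote (l : List Char) (hd : l.dropWhile (fun c => !pvIsQuote c) = []) :
    tokBRec l = (PySem.Chars.split₀ (l.takeWhile (fun c => !pvIsQuote c))).map String.ofList := by
  rw [tokBRec]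
  split
  · rfl
  · rename_i q r heq
    rw [hd] at heq
    exact absurd heq (by simp)

theorem tokBRec_unterminated (l : List Char) (q : Char) (r : List Char)
    (hd : l.dropWhile (fun c => !pvIsQuote c) = q :: r)
    (hd2 : r.dropWhile (fun c => c != q) = []) :
    tokBRec l = (PySem.Chars.split₀ (l.takeWhile (fun c => !pvIsQuote c))).map String.ofList
      ++ [String.ofList (q :: r.takeWhile (fun c => c != q))] := by
  rw [tokBRec]
  split
  · rename_i heq
    rw [hd] at heq
    exact absurd heq (by simp)
  · rename_i q' r' heq
    rw [hd] at heq
    injection heq with h1 h2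
    subst h1; subst h2
    split
    · rfl
    · rename_i c2 r'' heq2
      rw [hd2] at heq2
      exact absurd heq2 (by simp)

theorem tokBRec_closed (l : List Char) (q c2 : Char) (r r'' : List Char)
    (hd : l.dropWhile (fun c => !pvIsQuote c) = q :: r)
    (hd2 : r.dropWhile (fun c => c != q) = c2 :: r'') :
    tokBRec l = (PySem.Chars.split₀ (l.takeWhile (fun c => !pvIsQuote c))).map String.ofList
      ++ [String.ofList (q :: (r.takeWhile (fun c => c != q) ++ [q]))] ++ tokBRec r'' := by
  rw [tokBRec]
  split
  · rename_i heq
    rw [hd] at heq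
    exact absurd heq (by simp)
  · rename_i q' r' heq
    rw [hd] at heq
    injection heq with h1 h2
    subst h1; subst h2
    split
    · rename_i heq2
      rw [hd2] at heq2
      exact absurd heq2 (by simp)
    · rename_i c2' r2'' heq2
      rw [hd2] at heq2
      injection heq2 with h3 h4
      subst h3; subst h4
      rfl

-- A's state machine computes B's quote-region scan, by strong induction on the input
theorem tokA_eq_tokB (n : ℕ) (l : List Char) (hn : l.length ≤ n) (ts : List String) (sq : Char) :
    tokARec ts [] false sq l = ts ++ tokBRec l := by
  induction n generalizing l ts sq with
  | zero =>
    have : l = [] := by cases l <;> simp_all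
    subst this
    simp [tokARec, tokBRec, PySem.Chars.split₀, PySem.Chars.split₀.go]
  | succ n ih =>
    have hsplit := (List.takeWhile_append_dropWhile (p := fun c => !pvIsQuote c) (l := l)).symm
    have hpre : ∀ c ∈ l.takeWhile (fun c => !pvIsQuote c), pvIsQuote c = false := by
      intro c hc; have := List.mem_takeWhile_imp hc; simpa using this
    rcases hd : l.dropWhile (fun c => !pvIsQuote c) with _ | ⟨q, r⟩
    · -- no quote: A just splits on whitespace to the end
      conv_lhs => rw [hsplit, hd]
      rw [List.append_nil, tokA_nonquote_end _ hpre ts [] sq, tokBRec_no_quote l hd]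
      simp [PySem.Chars.split₀]
    · have hq : pvIsQuote q = true := by
        have := List.head_dropWhile_not (p := fun c => !pvIsQuote c) (l := l) (by simp [hd])
        simpa [hd] using this
      conv_lhs => rw [hsplit, hd]
      rw [tokA_nonquote_quote _ hpre ts [] sq q hq r]
      have hrsplit := (List.takeWhile_append_dropWhile (p := fun c => c != q) (l := r)).symm
      have hbody : ∀ c ∈ r.takeWhile (fun c => c != q), (c == q) = false := by
        intro c hc; have := List.mem_takeWhile_imp hc; simpa using this
      rcases hd2 : r.dropWhile (fun c => c != q) with _ | ⟨c2, r''⟩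
      · -- unterminated literal: runs to end of input
        conv_lhs => rw [hrsplit, hd2]
        rw [tokA_instring _ q hbody _ [q] [], tokBRec_unterminated l q r hd hd2]
        simp [tokARec, PySem.Chars.split₀]
      · have hc2 : c2 = q := by
          have := List.head_dropWhile_not (p := fun c => c != q) (l := r) (by simp [hd2])
          simpa [hd2] using this
        subst c2
        conv_lhs => rw [hrsplit, hd2]
        rw [tokA_instring _ q hbody _ [q] (q :: r'')]
        have hlen : r''.length ≤ n := by
          have h1 : (q :: r).length ≤ l.length := by
            rw [← hd]; exact List.length_dropWhile_le _ _
          have h2 : (q :: r'').length ≤ r.length := by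
            rw [← hd2]; exact List.length_dropWhile_le _ _
          simp at h1 h2; omega
        have hq' : (pvIsQuote q && !true) = false := by simp
        simp only [tokARec, hq', Bool.true_and, BEq.rfl, Bool.false_eq_true, if_false, if_true]
        rw [ih r'' hlen _ q, tokBRec_closed l q q r r'' hd hd2]
        simp [PySem.Chars.split₀]

-- ===== VERDICT (by name: the statement is the Claim_ definition above) =====
theorem tokenize_sql_spec : Claim_equal_tokenize_sql := by
  intro query _
  show tokenize_sql query = tokenize_sql_alt query
  unfold tokenize_sql tokenize_sql_alt
  simpa using tokA_eq_tokB query.toList.length query.toList le_rfl [] ' '
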